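-- pv_equiv track=rewrite | github.com/Magalileodato/Paython | paython_serie2/questao3_b.py | calcular_crc8
-- ===== SOURCE A (Python) =====
-- def calcular_crc8(data_bytes, polinomio=0x07):
--     crc = 0
--     for byte in data_bytes:
--         crc ^= byte
--         for _ in range(8):
--             if crc & 0x80:
--                 crc = (crc << 1) ^ polinomio
--             else:
--                 crc <<= 1
--             crc &= 0xFF
--     return crc
-- ===== SOURCE B (Python) =====
-- def calcular_crc8(data_bytes, polinomio=0x07):
--     p = polinomio % 256
--     table = []
--     for i in range(256):
--         c = i
--         for _ in range(8):
--             c = (c * 2) % 256 ^ p if c >= 128 else (c * 2) % 256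
--         table.append(c)
--     crc = 0
--     for byte in data_bytes:
--         crc = table[(byte % 256) ^ crc]
--     return crc
-- ===== Notes on version B (the rewrite author's own statement) =====
-- stated objective: faster
-- what changed: B precomputes a 256-entry lookup table from the polynomial reduced mod 256 (so the whole computation runs on nonnegative residues) and then processes each byte with a single table lookup indexed by (byte % 256) ^ crc, replacing A's per-byte 8-iteration signed bit loop.
import Mathlib
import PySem

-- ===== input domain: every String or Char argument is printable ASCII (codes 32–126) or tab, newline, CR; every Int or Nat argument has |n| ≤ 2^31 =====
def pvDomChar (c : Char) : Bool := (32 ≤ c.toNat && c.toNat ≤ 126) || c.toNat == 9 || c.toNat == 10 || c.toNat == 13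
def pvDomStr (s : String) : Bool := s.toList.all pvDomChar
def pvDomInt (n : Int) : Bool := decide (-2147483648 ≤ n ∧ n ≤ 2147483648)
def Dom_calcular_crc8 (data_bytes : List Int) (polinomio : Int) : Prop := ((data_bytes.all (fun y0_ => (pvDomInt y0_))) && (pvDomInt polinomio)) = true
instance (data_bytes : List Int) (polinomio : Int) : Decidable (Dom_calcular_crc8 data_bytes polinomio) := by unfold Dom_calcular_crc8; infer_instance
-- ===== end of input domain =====

-- B precomputes a 256-entry lookup table from the polynomial (reduced once mod 256, so the
-- table lives in nonnegative residues) and then processes each byte with one table lookup,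
-- replacing A's per-byte 8-step signed bit loop: a constant-factor speedup on long inputs.

-- ===== PORT A =====
def calcular_crc8 (data_bytes : List Int) (polinomio : Int) : Int :=
  data_bytes.foldl (fun crc byte =>
    (List.range 8).foldl (fun crc _ =>
      PySem.Int.band
        (if PySem.Int.band crc 0x80 ≠ 0 then PySem.Int.bxor (crc <<< (1 : Nat)) polinomio
         else crc <<< (1 : Nat)) 0xFF)
      (PySem.Int.bxor crc byte)) 0

-- ===== PORT B =====
-- Source B's `p = polinomio % 256` and `byte % 256` are Python mods with positive divisor, hence
-- values in [0, 256): they are kept as Nat (`.toNat` is exact on them).  All table entries and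
-- `crc` are then Nats < 256; the table index `(byte % 256) ^ crc` is < 256, so Python's list
-- indexing never raises and `List.getD … 0` is exact here.
def calcular_crc8_alt (data_bytes : List Int) (polinomio : Int) : Int :=
  let p : Nat := (PySem.Int.mod polinomio 256).toNat
  let table : List Nat := (List.range 256).map (fun i =>
    (List.range 8).foldl (fun c _ =>
      if 128 ≤ c then (c * 2) % 256 ^^^ p else (c * 2) % 256) i)
  ((data_bytes.foldl (fun crc byte =>
      table.getD ((PySem.Int.mod byte 256).toNat ^^^ crc) 0) 0 : Nat) : Int)

-- ===== PRECONDITION & SPEC =====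
def Spec_calcular_crc8 (data_bytes : List Int) (polinomio : Int) (out : Int) : Prop := out = calcular_crc8_alt data_bytes polinomio
instance (data_bytes : List Int) (polinomio : Int) (out : Int) : Decidable (Spec_calcular_crc8 data_bytes polinomio out) := by unfold Spec_calcular_crc8; infer_instance

-- ===== CLAIM (what is proved, stated in full; the proofs are below) =====
def Claim_equal_calcular_crc8 : Prop := ∀ (data_bytes : List Int) (polinomio : Int), Dom_calcular_crc8 data_bytes polinomio → Spec_calcular_crc8 data_bytes polinomio (calcular_crc8 data_bytes polinomio)

-- ===== LEMMAS AND PROOFS =====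

-- Nat toolkit
theorem pvNatAnd255 (m : Nat) : m &&& 255 = m % 256 := by
  simpa using Nat.and_two_pow_sub_one_eq_mod m 8

set_option maxRecDepth 8192 in
theorem pvNatSmall : ∀ b : Nat, b < 256 →
    (255 ^^^ b = 255 - b ∧ b &&& 128 = if 128 ≤ b then 128 else 0) := by decide

theorem pvNatAnd128 (m : Nat) : m &&& 128 = if 128 ≤ m % 256 then 128 else 0 := by
  have h : m &&& 128 = (m % 256) &&& 128 := by
    rw [← pvNatAnd255, Nat.and_assoc, show (255 &&& 128 : Nat) = 128 by decide]
  rw [h, (pvNatSmall (m % 256) (Nat.mod_lt _ (by norm_num))).2]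

theorem pvNatXorMod (m n : Nat) : (m ^^^ n) % 256 = (m % 256) ^^^ (n % 256) := by
  rw [← pvNatAnd255, Nat.and_xor_distrib_right, pvNatAnd255, pvNatAnd255]

theorem pvXorLt (a b : Nat) (ha : a < 256) (hb : b < 256) : a ^^^ b < 256 :=
  Nat.xor_lt_two_pow (n := 8) ha hb

theorem pvCompl (a b : Nat) (hb : b < 256) (h : a = 255 - b) (s : Nat) (hs : s < 256) :
    a ^^^ s = 255 - (b ^^^ s) := by
  have h1 : a = 255 ^^^ b := by rw [(pvNatSmall b hb).1, h]
  have h2 : 255 ^^^ (b ^^^ s) = 255 - (b ^^^ s) := (pvNatSmall _ (pvXorLt b s hb hs)).1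
  rw [h1, Nat.xor_assoc, h2]

-- band / bxor characterizations modulo 256
theorem pvBand255 (x : Int) : PySem.Int.band x 255 = x % 256 := by
  unfold PySem.Int.band
  split_ifs with h1 h2 h2
  · rw [show Int.toNat 255 = 255 from rfl, pvNatAnd255]; omega
  · omega
  · rw [show Int.toNat 255 = 255 from rfl, Nat.and_comm 255 _, pvNatAnd255]; omega
  · omega

theorem pvBand128 (x : Int) : (PySem.Int.band x 0x80 ≠ 0) ↔ 128 ≤ x % 256 := by
  unfold PySem.Int.band
  split_ifs with h1 h2 h2
  · rw [show Int.toNat 0x80 = 128 from rfl, pvNatAnd128]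
    constructor
    · intro h; by_contra hc
      have hlt : ¬ 128 ≤ x.toNat % 256 := by omega
      simp [hlt] at h
    · intro h
      have hle : 128 ≤ x.toNat % 256 := by omega
      simp [hle]
  · omega
  · rw [show Int.toNat 0x80 = 128 from rfl, Nat.and_comm 128 _, pvNatAnd128]
    have hm : ((-x - 1).toNat : Int) = -x - 1 := by omega
    by_cases hb : 128 ≤ (-x - 1).toNat % 256
    · simp only [if_pos hb]; omega
    · simp only [if_neg hb]; omega
  · omega

theorem pvBxorMod (y p : Int) :
    (PySem.Int.bxor y p) % 256 = (((y % 256).toNat) ^^^ ((p % 256).toNat) : Nat) := by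
  unfold PySem.Int.bxor
  split_ifs with h1 h2 h2
  · have ha : (y % 256).toNat = y.toNat % 256 := by omega
    have hb : (p % 256).toNat = p.toNat % 256 := by omega
    rw [ha, hb, ← pvNatXorMod]; omega
  · have ha : (y % 256).toNat = y.toNat % 256 := by omega
    have hb : (p % 256).toNat = 255 - (-p - 1).toNat % 256 := by omega
    have hx : (p % 256).toNat ^^^ (y % 256).toNat
        = 255 - ((-p - 1).toNat % 256 ^^^ (y % 256).toNat) := by
      exact pvCompl _ _ (by omega) hb _ (by omega)
    have hk : ((y.toNat ^^^ (-p - 1).toNat) : Nat) % 256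
        = (y % 256).toNat ^^^ (-p - 1).toNat % 256 := by
      rw [pvNatXorMod, ha]
    have hlt : (-p - 1).toNat % 256 ^^^ (y % 256).toNat < 256 :=
      pvXorLt _ _ (by omega) (by omega)
    rw [Nat.xor_comm ((y % 256).toNat)]
    rw [hx, Nat.xor_comm ((-p-1).toNat % 256)] at *
    omega
  · have ha : (y % 256).toNat = 255 - (-y - 1).toNat % 256 := by omega
    have hb : (p % 256).toNat = p.toNat % 256 := by omega
    have hx : (y % 256).toNat ^^^ (p % 256).toNat
        = 255 - ((-y - 1).toNat % 256 ^^^ (p % 256).toNat) :=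
      pvCompl _ _ (by omega) ha _ (by omega)
    have hk : (((-y - 1).toNat ^^^ p.toNat) : Nat) % 256
        = (-y - 1).toNat % 256 ^^^ (p % 256).toNat := by
      rw [pvNatXorMod, hb]
    have hlt : (-y - 1).toNat % 256 ^^^ (p % 256).toNat < 256 :=
      pvXorLt _ _ (by omega) (by omega)
    rw [hx]
    omega
  · have ha : (y % 256).toNat = 255 - (-y - 1).toNat % 256 := by omega
    have hb : (p % 256).toNat = 255 - (-p - 1).toNat % 256 := by omega
    have hx : (y % 256).toNat ^^^ (p % 256).toNat
        = 255 - ((-y - 1).toNat % 256 ^^^ (p % 256).toNat) :=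
      pvCompl _ _ (by omega) ha _ (by omega)
    have hy : (p % 256).toNat ^^^ ((-y - 1).toNat % 256)
        = 255 - ((-p - 1).toNat % 256 ^^^ ((-y - 1).toNat % 256)) :=
      pvCompl _ _ (by omega) hb _ (by omega)
    have hc1 : (-y - 1).toNat % 256 ^^^ (p % 256).toNat
        = (p % 256).toNat ^^^ ((-y - 1).toNat % 256) := Nat.xor_comm _ _
    have hc2 : (-p - 1).toNat % 256 ^^^ ((-y - 1).toNat % 256)
        = (-y - 1).toNat % 256 ^^^ ((-p - 1).toNat % 256) := Nat.xor_comm _ _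
    have hk : (((-y - 1).toNat ^^^ (-p - 1).toNat) : Nat) % 256
        = (-y - 1).toNat % 256 ^^^ ((-p - 1).toNat % 256) := pvNatXorMod _ _
    have hlt2 : (-y - 1).toNat % 256 ^^^ ((-p - 1).toNat % 256) < 256 :=
      pvXorLt _ _ (by omega) (by omega)
    omega

-- A's inner-loop body and n-round iteration
def pvStep (pol c : Int) : Int :=
  PySem.Int.band
    (if PySem.Int.band c 0x80 ≠ 0 then PySem.Int.bxor (c <<< (1 : Nat)) pol
     else c <<< (1 : Nat)) 0xFF

def pvRoundN (pol : Int) (n : Nat) (c : Int) : Int :=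
  (List.range n).foldl (fun c _ => pvStep pol c) c

-- B's inner-loop body and n-round iteration
def pvNStep (p c : Nat) : Nat := if 128 ≤ c then (c * 2) % 256 ^^^ p else (c * 2) % 256

def pvNRoundN (p : Nat) (n c : Nat) : Nat :=
  (List.range n).foldl (fun c _ => pvNStep p c) c

theorem pvShift1 (c : Int) : c <<< (1 : Nat) = 2 * c := by
  rw [Int.shiftLeft_eq]; ring

theorem pvModPos (x : Int) : PySem.Int.mod x 256 = x % 256 :=
  PySem.Int.mod_eq_emod_of_pos (by norm_num)

-- one A-step on a Nat-represented state equals one B-step, cast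
theorem pvStepAgree (pol : Int) (c : Nat) (hc : c < 256) :
    pvStep pol (↑c) = ↑(pvNStep (PySem.Int.mod pol 256).toNat c) := by
  have hp : ((PySem.Int.mod pol 256).toNat : Int) = pol % 256 := by
    rw [pvModPos]; omega
  have hcm : (↑c : Int) % 256 = ↑c := by omega
  unfold pvStep pvNStep
  by_cases hb : 128 ≤ c
  · rw [if_pos ((pvBand128 _).mpr (by omega)), if_pos hb]
    rw [pvBand255, pvShift1, pvBxorMod, pvModPos]
    congr 2
    omega
  · rw [if_neg (fun hx => hb (by have := (pvBand128 _).mp hx; omega)), if_neg hb]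
    rw [pvBand255, pvShift1]
    omega

theorem pvNStepBound (p c : Nat) (hp : p < 256) : pvNStep p c < 256 := by
  unfold pvNStep
  split_ifs
  · exact pvXorLt _ _ (Nat.mod_lt _ (by norm_num)) hp
  · exact Nat.mod_lt _ (by norm_num)

theorem pvModToNatLt (x : Int) : (PySem.Int.mod x 256).toNat < 256 := by
  rw [pvModPos]; omega

theorem pvRoundAgree (pol : Int) (n : Nat) (c : Nat) (hc : c < 256) :
    pvRoundN pol n (↑c) = ↑(pvNRoundN (PySem.Int.mod pol 256).toNat n c)
      ∧ pvNRoundN (PySem.Int.mod pol 256).toNat n c < 256 := by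
  induction n generalizing c with
  | zero => exact ⟨rfl, hc⟩
  | succ k ih =>
    have hstep := pvStepAgree pol c hc
    have hlt := pvNStepBound (PySem.Int.mod pol 256).toNat c (pvModToNatLt pol)
    have ihk := ih (pvNStep (PySem.Int.mod pol 256).toNat c) hlt
    unfold pvRoundN pvNRoundN at *
    rw [List.range_succ_eq_map] at *
    simp only [List.foldl_cons, List.foldl_map] at *
    rw [hstep]
    exact ihk

-- congruence for A's round: only the state mod 256 matters
theorem pvStepCongr (pol c₁ c₂ : Int) (h : c₁ % 256 = c₂ % 256) :
    pvStep pol c₁ = pvStep pol c₂ := by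
  unfold pvStep
  have h2 : (2 * c₁) % 256 = (2 * c₂) % 256 := by omega
  by_cases hb : 128 ≤ c₁ % 256
  · rw [if_pos ((pvBand128 c₁).mpr hb), if_pos ((pvBand128 c₂).mpr (by omega))]
    rw [pvBand255, pvBand255, pvShift1, pvShift1, pvBxorMod, pvBxorMod, h2]
  · rw [if_neg (fun hc => hb (by have := (pvBand128 c₁).mp hc; omega)),
        if_neg (fun hc => hb (by have := (pvBand128 c₂).mp hc; omega))]
    rw [pvBand255, pvBand255, pvShift1, pvShift1, h2]

theorem pvRoundN_succ (pol : Int) (n : Nat) (c : Int) :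
    pvRoundN pol (n + 1) c = pvRoundN pol n (pvStep pol c) := by
  unfold pvRoundN
  rw [List.range_succ_eq_map]
  simp only [List.foldl_cons, List.foldl_map]

theorem pvRoundCongr (pol : Int) (n : Nat) (c₁ c₂ : Int) (h : c₁ % 256 = c₂ % 256) :
    pvRoundN pol (n + 1) c₁ = pvRoundN pol (n + 1) c₂ := by
  rw [pvRoundN_succ, pvRoundN_succ, pvStepCongr pol c₁ c₂ h]

-- B's table lookup at an in-range index is the 8-round function
theorem pvTblGet (p : Nat) (j : Nat) (hj : j < 256) :
    (List.getD ((List.range 256).map (fun i => pvNRoundN p 8 i)) j 0) = pvNRoundN p 8 j := by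
  have hlt : j < ((List.range 256).map (fun i => pvNRoundN p 8 i)).length := by
    rw [List.length_map, List.length_range]; omega
  rw [List.getD_eq_getElem _ _ hlt]
  simp only [List.getElem_map, List.getElem_range]

-- per-byte agreement: A's round on (crc ^ byte) = table[(byte % 256) ^ crc], cast
theorem pvByteAgree (pol byte : Int) (n : Nat) (hn : n < 256) :
    pvRoundN pol 8 (PySem.Int.bxor (↑n) byte)
      = ↑(List.getD ((List.range 256).map (fun i => pvNRoundN (PySem.Int.mod pol 256).toNat 8 i))
            ((PySem.Int.mod byte 256).toNat ^^^ n) 0)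
    ∧ (List.getD ((List.range 256).map (fun i => pvNRoundN (PySem.Int.mod pol 256).toNat 8 i))
            ((PySem.Int.mod byte 256).toNat ^^^ n) 0) < 256 := by
  set m : Nat := (PySem.Int.mod byte 256).toNat with hm
  have hmlt : m < 256 := pvModToNatLt byte
  have hxlt : n ^^^ m < 256 := pvXorLt n m hn hmlt
  have hmod : (PySem.Int.bxor (↑n) byte) % 256 = ((n ^^^ m : Nat) : Int) := by
    rw [pvBxorMod]
    have h1 : (((n : Int)) % 256).toNat = n := by omega
    have h2 : ((byte % 256)).toNat = m := by rw [hm, pvModPos]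
    rw [h1, h2]
  have hcongr : pvRoundN pol 8 (PySem.Int.bxor (↑n) byte) = pvRoundN pol 8 ((n ^^^ m : Nat) : Int) := by
    exact pvRoundCongr pol 7 _ _ (by rw [hmod]; omega)
  have hround := pvRoundAgree pol 8 (n ^^^ m) hxlt
  rw [Nat.xor_comm m n, pvTblGet _ _ hxlt]
  exact ⟨by rw [hcongr, hround.1], hround.2⟩

-- the two folds agree, state cast, by induction on the byte list
theorem pvFoldAgree (pol : Int) (db : List Int) (n : Nat) (hn : n < 256) :
    db.foldl (fun crc byte => pvRoundN pol 8 (PySem.Int.bxor crc byte)) (↑n)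
      = ↑(db.foldl (fun crc byte =>
          List.getD ((List.range 256).map (fun i => pvNRoundN (PySem.Int.mod pol 256).toNat 8 i))
            ((PySem.Int.mod byte 256).toNat ^^^ crc) 0) n) := by
  induction db generalizing n with
  | nil => rfl
  | cons b t ih =>
    simp only [List.foldl_cons]
    have h := pvByteAgree pol b n hn
    rw [h.1]
    exact ih _ h.2

theorem pvBridgeA (db : List Int) (pol : Int) :
    calcular_crc8 db pol
      = db.foldl (fun crc byte => pvRoundN pol 8 (PySem.Int.bxor crc byte)) 0 := rfl

theorem pvBridgeB (db : List Int) (pol : Int) :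
    calcular_crc8_alt db pol
      = ↑(db.foldl (fun crc byte =>
          List.getD ((List.range 256).map (fun i => pvNRoundN (PySem.Int.mod pol 256).toNat 8 i))
            ((PySem.Int.mod byte 256).toNat ^^^ crc) 0) 0) := rfl

-- ===== VERDICT (by name: the statement is the Claim_ definition above) =====
theorem calcular_crc8_spec : Claim_equal_calcular_crc8 := by
  intro db pol _
  unfold Spec_calcular_crc8
  rw [pvBridgeA, pvBridgeB]
  exact_mod_cast pvFoldAgree pol db 0 (by norm_num)
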